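-- pv_equiv track=rewrite | github.com/RenSolvyn/HermesAnnot | sfrp_kappa_pipeline.py | find_disagreements
-- ===== SOURCE A (Python) =====
-- def find_disagreements(va, vb, feature=None):
--     ka = set(va.keys())
--     kb = set(vb.keys())
--     if feature:
--         ka = {k for k in ka if k[0] == feature}
--         kb = {k for k in kb if k[0] == feature}
--     out = []
--     for k in sorted(ka & kb):
--         ra, rb = va[k], vb[k]
--         if ra["human_verdict"] != rb["human_verdict"]:
--             out.append({"feature": k[0], "index": k[1],
--                         "verdict_a": ra["human_verdict"], "verdict_b": rb["human_verdict"]})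
--     return out
-- ===== SOURCE B (Python) =====
-- def find_disagreements(va, vb, feature=None):
--     # merge-join: sort each side's filtered items once, then a two-pointer scan;
--     # no key sets, no intersection, no dict lookups.
--     def pairs(d):
--         return sorted(((k, r) for k, r in d.items()
--                        if not feature or k[0] == feature),
--                       key=lambda p: p[0])
--     pa, pb = pairs(va), pairs(vb)
--     out = []
--     i = j = 0
--     while i < len(pa) and j < len(pb):
--         ka, ra = pa[i]
--         kb, rb = pb[j]
--         if ka < kb:
--             i += 1
--         elif kb < ka:
--             j += 1
--         else:
--             ha, hb = ra["human_verdict"], rb["human_verdict"]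
--             if ha != hb:
--                 out.append({"feature": ka[0], "index": ka[1],
--                             "verdict_a": ha, "verdict_b": hb})
--             i += 1
--             j += 1
--     return out
-- ===== Notes on version B (the rewrite author's own statement) =====
-- stated objective: alternative
-- what changed: Replaces A's key-set intersection plus sorted-scan-with-dict-lookups by a merge join: each side's filtered items are sorted once by key and a two-pointer scan over the two sorted lists emits a disagreement row at each equal-key pair, with no key sets and no dict lookups.
import Mathlib
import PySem

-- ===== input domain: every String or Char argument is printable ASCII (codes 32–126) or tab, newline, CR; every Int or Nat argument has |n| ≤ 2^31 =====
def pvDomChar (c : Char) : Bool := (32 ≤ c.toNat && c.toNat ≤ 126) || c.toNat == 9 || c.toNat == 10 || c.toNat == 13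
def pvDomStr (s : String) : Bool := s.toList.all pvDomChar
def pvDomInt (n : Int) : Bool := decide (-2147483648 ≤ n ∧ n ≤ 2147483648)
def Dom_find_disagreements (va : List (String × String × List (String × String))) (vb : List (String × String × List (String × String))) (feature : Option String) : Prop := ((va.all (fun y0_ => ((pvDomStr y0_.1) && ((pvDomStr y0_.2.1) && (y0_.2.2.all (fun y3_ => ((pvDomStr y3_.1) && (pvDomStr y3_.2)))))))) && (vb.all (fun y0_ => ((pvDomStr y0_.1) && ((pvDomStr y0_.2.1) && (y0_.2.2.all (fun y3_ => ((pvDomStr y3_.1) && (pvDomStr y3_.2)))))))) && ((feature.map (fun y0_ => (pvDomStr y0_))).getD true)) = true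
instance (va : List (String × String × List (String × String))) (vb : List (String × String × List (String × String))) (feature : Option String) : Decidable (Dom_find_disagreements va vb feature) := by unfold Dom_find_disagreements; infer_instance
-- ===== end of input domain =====

-- B replaces A's "intersect two key sets, then scan the sorted intersection with dict lookups"
-- by a merge join: sort each side's filtered items once by key, then a two-pointer scan
-- emits a row at each equal-key pair with differing verdicts (objective: alternative).

-- shared transliteration helpers: an entry's (feature, index) key, the dict keyed by it,
-- Python's `if feature:` truthiness, r["human_verdict"] (total form, exact under Pre_), the literal result dict
def pvKeyOf (p : String × String × List (String × String)) : String × String := (p.1, p.2.1)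
def pvDictOf (xs : List (String × String × List (String × String))) : PySem.Dict (String × String) (List (String × String)) := PySem.Dict.mk (xs.map (fun p => ((p.1, p.2.1), p.2.2)))
def pvFeatTruthy (feature : Option String) : Bool := match feature with | none => false | some f => !(f == "")
def pvHV (r : List (String × String)) : String := PySem.Dict.getD (PySem.Dict.mk r) "human_verdict" ""
def pvMkRow (k : String × String) (a b : String) : List (String × String) := [("feature", k.1), ("index", k.2), ("verdict_a", a), ("verdict_b", b)]

-- ===== PORT A =====
def find_disagreements (va : List (String × String × List (String × String))) (vb : List (String × String × List (String × String))) (feature : Option String) : List (List (String × String)) :=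
  let ka := PySem.Set.ofList (va.map pvKeyOf)
  let kb := PySem.Set.ofList (vb.map pvKeyOf)
  let ka := if pvFeatTruthy feature then PySem.Set.ofList (ka.filter (fun k => k.1 == feature.getD "")) else ka
  let kb := if pvFeatTruthy feature then PySem.Set.ofList (kb.filter (fun k => k.1 == feature.getD "")) else kb
  (PySem.List.sorted2 (PySem.Set.inter ka kb) Prod.fst Prod.snd).foldl
    (fun out k =>
      let ra := PySem.Dict.getD (pvDictOf va) k []
      let rb := PySem.Dict.getD (pvDictOf vb) k []
      if pvHV ra ≠ pvHV rb then out ++ [pvMkRow k (pvHV ra) (pvHV rb)] else out) []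

-- ===== PORT B =====
-- Source B's pairs(d): the (key, record) pairs surviving the feature filter, sorted by the full key tuple
def pvPairs (feature : Option String) (d : List (String × String × List (String × String))) : List ((String × String) × List (String × String)) :=
  PySem.List.sorted2 ((d.filter (fun p => !(pvFeatTruthy feature) || (p.1 == feature.getD ""))).map (fun p => (pvKeyOf p, p.2.2))) (fun q => q.1.1) (fun q => q.1.2)

-- Python `ka < kb` on key tuples (lexicographic)
def pvKLt (a b : String × String) : Bool := decide (toLex a < toLex b)

-- Source B's two-pointer while loop, as recursion on the two sorted suffixes
def pvMerge : List ((String × String) × List (String × String)) → List ((String × String) × List (String × String)) → List (List (String × String))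
  | [], _ => []
  | _ :: _, [] => []
  | (ka, ra) :: ta, (kb, rb) :: tb =>
    if pvKLt ka kb then pvMerge ta ((kb, rb) :: tb)
    else if pvKLt kb ka then pvMerge ((ka, ra) :: ta) tb
    else (if pvHV ra ≠ pvHV rb then [pvMkRow ka (pvHV ra) (pvHV rb)] else []) ++ pvMerge ta tb
termination_by pa pb => pa.length + pb.length
decreasing_by all_goals simp <;> omega

def find_disagreements_alt (va : List (String × String × List (String × String))) (vb : List (String × String × List (String × String))) (feature : Option String) : List (List (String × String)) :=
  pvMerge (pvPairs feature va) (pvPairs feature vb)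

-- ===== PRECONDITION & SPEC =====
def pvFeatOk (feature : Option String) (k1 : String) : Bool := !(pvFeatTruthy feature) || (k1 == feature.getD "")
-- Pre_ excludes (a) assoc lists carrying the same key twice, where the Python dict they stand for is
-- ambiguous (first vs last value is anybody's choice), and (b) inputs where a record reached by the scan
-- lacks "human_verdict", on which Python A raises KeyError.
def Pre_find_disagreements (va : List (String × String × List (String × String))) (vb : List (String × String × List (String × String))) (feature : Option String) : Prop :=
  (va.map pvKeyOf).Nodup ∧ (vb.map pvKeyOf).Nodup ∧
  ∀ p ∈ va, ∀ q ∈ vb, pvKeyOf p = pvKeyOf q → pvFeatOk feature p.1 = true →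
    ("human_verdict" ∈ p.2.2.map Prod.fst ∧ "human_verdict" ∈ q.2.2.map Prod.fst)
instance (va : List (String × String × List (String × String))) (vb : List (String × String × List (String × String))) (feature : Option String) : Decidable (Pre_find_disagreements va vb feature) := by unfold Pre_find_disagreements; infer_instance
def pvWitness_find_disagreements : (List (String × String × List (String × String))) × (List (String × String × List (String × String))) × Option String :=
  ([("f", "0", [("human_verdict", "yes")]), ("g", "1", [("human_verdict", "no")])],
   [("f", "0", [("human_verdict", "no")])],
   none)
def Spec_find_disagreements (va : List (String × String × List (String × String))) (vb : List (String × String × List (String × String))) (feature : Option String) (out : List (List (String × String))) : Prop := out = find_disagreements_alt va vb feature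
instance (va : List (String × String × List (String × String))) (vb : List (String × String × List (String × String))) (feature : Option String) (out : List (List (String × String))) : Decidable (Spec_find_disagreements va vb feature out) := by unfold Spec_find_disagreements; infer_instance

-- ===== CLAIM (what is proved, stated in full; the proofs are below) =====
def Claim_equal_find_disagreements : Prop := ∀ (va : List (String × String × List (String × String))) (vb : List (String × String × List (String × String))) (feature : Option String), Dom_find_disagreements va vb feature → Pre_find_disagreements va vb feature → Spec_find_disagreements va vb feature (find_disagreements va vb feature)

-- ===== LEMMAS AND PROOFS =====

theorem sorted2_eq_sorted_lex {α κ₁ κ₂ : Type} [LinearOrder κ₁] [LinearOrder κ₂] (xs : List α) (k1 : α → κ₁) (k2 : α → κ₂) :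
    PySem.List.sorted2 xs k1 k2 = PySem.List.sorted xs (fun a => toLex (k1 a, k2 a)) := by
  have hb : (fun (a b : α) => decide (k1 a < k1 b) || (!decide (k1 b < k1 a) && decide (k2 a < k2 b)))
      = fun a b => decide (toLex (k1 a, k2 a) < toLex (k1 b, k2 b)) := by
    funext a b
    rcases lt_trichotomy (k1 a) (k1 b) with h | h | h
    · simp [Prod.Lex.lt_iff, h]
    · simp [Prod.Lex.lt_iff, h]
    · simp [Prod.Lex.lt_iff, h, lt_asymm h, ne_of_gt h]
  unfold PySem.List.sorted2 PySem.List.sorted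
  simp only [if_neg (by decide : ¬ (false = true))]
  rw [hb]

theorem ofList_eq_self_of_nodup {α : Type} [BEq α] [LawfulBEq α] (xs : List α) (h : xs.Nodup) :
    PySem.Set.ofList xs = xs := by
  have key : ∀ (ys s : List α), (s ++ ys).Nodup → ys.foldl PySem.Set.add s = s ++ ys := by
    intro ys
    induction ys with
    | nil => intro s _; simp
    | cons x t ih =>
      intro s hnd
      have hx : x ∉ s := by
        intro hmem
        rcases List.nodup_append.1 hnd with ⟨_, _, hdisj⟩
        exact hdisj x hmem x (by simp) rfl
      have hadd : PySem.Set.add s x = s ++ [x] := by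
        unfold PySem.Set.add
        rw [if_neg]
        simp [hx]
      simp only [List.foldl_cons, hadd]
      rw [ih (s ++ [x]) (by simpa using hnd)]
      simp
  have := key xs [] (by simpa using h)
  simpa [PySem.Set.ofList] using this

theorem get?_pvDictOf_of_mem (xs : List (String × String × List (String × String)))
    (hnd : (xs.map pvKeyOf).Nodup) (p : String × String × List (String × String)) (hp : p ∈ xs) :
    PySem.Dict.get? (pvDictOf xs) (pvKeyOf p) = some p.2.2 := by
  induction xs with
  | nil => cases hp
  | cons q t ih =>
    simp only [List.map_cons, List.nodup_cons] at hnd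
    rcases List.mem_cons.1 hp with rfl | hpt
    · simp [pvDictOf, PySem.Dict.get?, pvKeyOf]
    · have hne : (pvKeyOf q == pvKeyOf p) = false := by
        have : pvKeyOf p ∈ t.map pvKeyOf := List.mem_map_of_mem hpt
        have hne' : pvKeyOf q ≠ pvKeyOf p := fun he => hnd.1 (he ▸ this)
        simpa using hne'
      have := ih hnd.2 hpt
      simp only [pvDictOf, PySem.Dict.get?, List.map_cons, List.find?_cons] at this ⊢
      rw [show ((q.1, q.2.1) == pvKeyOf p) = false from hne]
      exact this

-- sorted by a key with pairwise-distinct key values is strictly key-increasing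
theorem sorted_key_pairwise_lt {α : Type} (xs : List α) (k : α → String × String)
    (h : (xs.map k).Nodup) :
    (PySem.List.sorted xs (fun a => toLex ((k a).1, (k a).2))).Pairwise
      (fun a b => toLex ((k a).1, (k a).2) < toLex ((k b).1, (k b).2)) := by
  have hle := PySem.List.sorted_pairwise xs (fun a => toLex ((k a).1, (k a).2))
  have hndm : ((PySem.List.sorted xs (fun a => toLex ((k a).1, (k a).2))).map k).Nodup :=
    (((PySem.List.sorted_perm xs (fun a => toLex ((k a).1, (k a).2)) false).map k).nodup_iff).2 h
  have hpw : (PySem.List.sorted xs (fun a => toLex ((k a).1, (k a).2))).Pairwise (fun a b => k a ≠ k b) := by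
    simpa [List.Nodup, List.pairwise_map] using hndm
  exact (hle.and hpw).imp (fun {a b} hab => lt_of_le_of_ne hab.1 (by
    intro he
    exact hab.2 (by
      have : ((k a).1, (k a).2) = ((k b).1, (k b).2) := toLex_inj.mp he
      have h1 : (k a).1 = (k b).1 := congrArg Prod.fst this
      have h2 : (k a).2 = (k b).2 := congrArg Prod.snd this
      exact Prod.ext h1 h2)))

theorem sorted_pairwise_lt_of_nodup (M : List (String × String)) (h : M.Nodup) :
    (PySem.List.sorted M (fun k => toLex (k.1, k.2))).Pairwise
      (fun a b => toLex ((a.1 : String), (a.2 : String)) < toLex (b.1, b.2)) :=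
  sorted_key_pairwise_lt M id (by simpa using h)

theorem sorted_filter_comm (M : List (String × String)) (h : M.Nodup) (p : (String × String) → Bool) :
    (PySem.List.sorted M (fun k => toLex (k.1, k.2))).filter p
      = PySem.List.sorted (M.filter p) (fun k => toLex (k.1, k.2)) :=
  (PySem.List.sorted_eq_of_perm_of_pairwise_lt _ _ _
    ((PySem.List.sorted_perm M (fun k => toLex (k.1, k.2)) false).filter p)
    ((sorted_pairwise_lt_of_nodup M h).filter p)).symm

theorem sorted_map_pair {β : Type} (M : List (String × String)) (h : M.Nodup) (f : (String × String) → β) :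
    PySem.List.sorted (M.map (fun k => (k, f k))) (fun q => toLex (q.1.1, q.1.2))
      = (PySem.List.sorted M (fun k => toLex (k.1, k.2))).map (fun k => (k, f k)) :=
  PySem.List.sorted_eq_of_perm_of_pairwise_lt _ _ _
    ((PySem.List.sorted_perm M (fun k => toLex (k.1, k.2)) false).map (fun k => (k, f k)))
    (List.pairwise_map.2 (sorted_pairwise_lt_of_nodup M h))

theorem inter_eq (va vb : List (String × String × List (String × String))) (feature : Option String)
    (hA : (va.map pvKeyOf).Nodup) (hB : (vb.map pvKeyOf).Nodup) :
    PySem.Set.inter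
      (if pvFeatTruthy feature then PySem.Set.ofList ((PySem.Set.ofList (va.map pvKeyOf)).filter (fun k => k.1 == feature.getD "")) else PySem.Set.ofList (va.map pvKeyOf))
      (if pvFeatTruthy feature then PySem.Set.ofList ((PySem.Set.ofList (vb.map pvKeyOf)).filter (fun k => k.1 == feature.getD "")) else PySem.Set.ofList (vb.map pvKeyOf))
    = (va.map pvKeyOf).filter (fun k => pvFeatOk feature k.1 && decide (k ∈ vb.map pvKeyOf)) := by
  rw [ofList_eq_self_of_nodup _ hA, ofList_eq_self_of_nodup _ hB]
  by_cases ht : pvFeatTruthy feature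
  · rw [if_pos ht, if_pos ht,
      ofList_eq_self_of_nodup _ (hA.filter _), ofList_eq_self_of_nodup _ (hB.filter _)]
    unfold PySem.Set.inter
    rw [List.filter_filter]
    apply List.filter_congr
    intro k _
    by_cases hc : (k.1 == feature.getD "") = true
    · simp [List.mem_filter, hc, pvFeatOk, ht]
    · simp only [Bool.not_eq_true] at hc
      simp [List.mem_filter, hc, pvFeatOk, ht]
  · rw [if_neg ht, if_neg ht]
    unfold PySem.Set.inter
    apply List.filter_congr
    intro k _
    simp only [Bool.not_eq_true] at ht
    simp [pvFeatOk, ht]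

-- B side helper lemmas --------------------------------------------------------

theorem pvFlatMap_congr {α β : Type} (l : List α) (f g : α → List β)
    (h : ∀ a ∈ l, f a = g a) : l.flatMap f = l.flatMap g := by
  induction l with
  | nil => rfl
  | cons x t ih =>
    simp only [List.flatMap_cons]
    rw [h x (by simp), ih (fun a ha => h a (by simp [ha]))]

theorem pvFlatMap_ite {α β : Type} (l : List α) (p : α → Bool) (f : α → β) :
    (l.flatMap fun x => if p x then [f x] else []) = (l.filter p).map f := by
  induction l with
  | nil => rfl
  | cons x t ih =>
    by_cases hp : p x = true <;> simp [hp, ih]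

theorem find?_none_of_forall_gt (pb : List ((String × String) × List (String × String)))
    (k : String × String) (h : ∀ q ∈ pb, toLex k < toLex q.1) :
    pb.find? (fun q => q.1 == k) = none := by
  apply List.find?_eq_none.2
  intro q hq
  simp only [beq_iff_eq]
  intro he
  exact absurd (he ▸ h q hq) (lt_irrefl _)

theorem find?_map_pair {β : Type} (ks : List (String × String)) (h : (String × String) → β) (k : String × String) :
    ((ks.map (fun x => (x, h x))).find? (fun q => q.1 == k)) = if k ∈ ks then some (k, h k) else none := by
  induction ks with
  | nil => simp
  | cons x t ih =>
    by_cases hx : x = k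
    · subst hx; simp
    · have hb : (x == k) = false := by simpa using hx
      have hkx : ¬ k = x := fun h => hx h.symm
      simp only [List.map_cons, List.find?_cons, hb]
      rw [ih]
      simp [List.mem_cons, hkx]

theorem pvMerge_cons_cons (ka : String × String) (ra : List (String × String))
    (ta : List ((String × String) × List (String × String))) (kb : String × String)
    (rb : List (String × String)) (tb : List ((String × String) × List (String × String))) :
    pvMerge ((ka, ra) :: ta) ((kb, rb) :: tb) =
      if pvKLt ka kb then pvMerge ta ((kb, rb) :: tb)
      else if pvKLt kb ka then pvMerge ((ka, ra) :: ta) tb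
      else (if pvHV ra ≠ pvHV rb then [pvMkRow ka (pvHV ra) (pvHV rb)] else []) ++ pvMerge ta tb := by
  rw [pvMerge]

-- merge-join correctness on strictly key-sorted inputs
theorem merge_spec : ∀ (pa pb : List ((String × String) × List (String × String))),
    pa.Pairwise (fun x y => toLex x.1 < toLex y.1) →
    pb.Pairwise (fun x y => toLex x.1 < toLex y.1) →
    pvMerge pa pb = pa.flatMap (fun p =>
      match pb.find? (fun q => q.1 == p.1) with
      | none => []
      | some q => if pvHV p.2 ≠ pvHV q.2 then [pvMkRow p.1 (pvHV p.2) (pvHV q.2)] else []) := by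
  intro pa pb
  induction pa, pb using pvMerge.induct with
  | case1 pb => intro _ _; simp [pvMerge]
  | case2 x t => intro _ _; simp [pvMerge]
  | case3 ka ra ta kb rb tb hlt ih =>
    intro hpa hpb
    have hlt' : toLex ka < toLex kb := by simpa [pvKLt] using hlt
    have hnone : ((kb, rb) :: tb).find? (fun q => q.1 == ka) = none := by
      apply find?_none_of_forall_gt
      intro q hq
      rcases List.mem_cons.1 hq with rfl | hq'
      · exact hlt'
      · exact lt_trans hlt' ((List.pairwise_cons.1 hpb).1 q hq')
    rw [pvMerge_cons_cons, if_pos hlt]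
    rw [ih hpa.tail hpb, List.flatMap_cons, hnone]
    rfl
  | case4 ka ra ta kb rb tb hlt hgt ih =>
    intro hpa hpb
    have hgt' : toLex kb < toLex ka := by simpa [pvKLt] using hgt
    rw [pvMerge_cons_cons, if_neg hlt, if_pos hgt]
    rw [ih hpa hpb.tail]
    apply pvFlatMap_congr
    intro p hp
    have hlep : toLex ka ≤ toLex p.1 := by
      rcases List.mem_cons.1 hp with rfl | hp'
      · exact le_refl _
      · exact le_of_lt ((List.pairwise_cons.1 hpa).1 p hp')
    have hne : (kb == p.1) = false := by
      apply beq_eq_false_iff_ne.2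
      intro he
      exact absurd (lt_of_lt_of_le hgt' hlep) (he ▸ lt_irrefl _)
    simp only [List.find?_cons, hne]
  | case5 ka ra ta kb rb tb hlt hgt ih =>
    intro hpa hpb
    have h1 : ¬ toLex ka < toLex kb := by simpa [pvKLt] using hlt
    have h2 : ¬ toLex kb < toLex ka := by simpa [pvKLt] using hgt
    have hkk : kb = ka := toLex_inj.mp (le_antisymm (le_of_not_gt h1) (le_of_not_gt h2))
    rw [pvMerge_cons_cons, if_neg hlt, if_neg hgt]
    rw [ih hpa.tail hpb.tail, List.flatMap_cons]
    have hfind : ((kb, rb) :: tb).find? (fun q => q.1 == ka) = some (kb, rb) := by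
      simp [hkk]
    rw [hfind]
    have htail : ta.flatMap (fun p =>
        match ((kb, rb) :: tb).find? (fun q => q.1 == p.1) with
        | none => []
        | some q => if pvHV p.2 ≠ pvHV q.2 then [pvMkRow p.1 (pvHV p.2) (pvHV q.2)] else [])
        = ta.flatMap (fun p =>
        match tb.find? (fun q => q.1 == p.1) with
        | none => []
        | some q => if pvHV p.2 ≠ pvHV q.2 then [pvMkRow p.1 (pvHV p.2) (pvHV q.2)] else []) := by
      apply pvFlatMap_congr
      intro p hp
      have hltp : toLex ka < toLex p.1 := (List.pairwise_cons.1 hpa).1 p hp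
      have hne : (kb == p.1) = false := by
        apply beq_eq_false_iff_ne.2
        intro he
        exact absurd (he ▸ hltp) (hkk ▸ lt_irrefl _)
      simp only [List.find?_cons, hne]
    rw [← htail]

-- pvPairs as a map over the sorted filtered key list
theorem pairs_eq (feature : Option String) (d : List (String × String × List (String × String)))
    (hnd : (d.map pvKeyOf).Nodup) :
    pvPairs feature d
      = (PySem.List.sorted ((d.map pvKeyOf).filter (fun k => pvFeatOk feature k.1)) (fun k => toLex (k.1, k.2))).map
          (fun k => (k, PySem.Dict.getD (pvDictOf d) k [])) := by
  have hd : ∀ p ∈ d, PySem.Dict.getD (pvDictOf d) (pvKeyOf p) [] = p.2.2 := by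
    intro p hp
    simp [PySem.Dict.getD, get?_pvDictOf_of_mem d hnd p hp]
  unfold pvPairs
  rw [sorted2_eq_sorted_lex]
  have hitems : (d.filter (fun p => !(pvFeatTruthy feature) || (p.1 == feature.getD ""))).map (fun p => (pvKeyOf p, p.2.2))
      = ((d.map pvKeyOf).filter (fun k => pvFeatOk feature k.1)).map
          (fun k => (k, PySem.Dict.getD (pvDictOf d) k [])) := by
    rw [List.filter_map]
    have hpred : ((fun k => pvFeatOk feature (Prod.fst k)) ∘ pvKeyOf)
        = fun p => !(pvFeatTruthy feature) || (p.1 == feature.getD "") := by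
      funext p; rfl
    rw [hpred, List.map_map]
    apply List.map_congr_left
    intro p hp
    have := hd p (List.mem_of_mem_filter hp)
    simp [Function.comp, this]
  rw [hitems]
  exact sorted_map_pair _ (hnd.filter _) _

-- A-side normal form
theorem foldl_A_eq (M : List (String × String)) (va vb : List (String × String × List (String × String))) :
    M.foldl (fun out k =>
      let ra := PySem.Dict.getD (pvDictOf va) k []
      let rb := PySem.Dict.getD (pvDictOf vb) k []
      if pvHV ra ≠ pvHV rb then out ++ [pvMkRow k (pvHV ra) (pvHV rb)] else out) []
    = (M.filter (fun k => decide (pvHV (PySem.Dict.getD (pvDictOf va) k []) ≠ pvHV (PySem.Dict.getD (pvDictOf vb) k [])))).map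
        (fun k => pvMkRow k (pvHV (PySem.Dict.getD (pvDictOf va) k [])) (pvHV (PySem.Dict.getD (pvDictOf vb) k []))) := by
  have := PySem.List.foldl_append_ite
    (l := M) (acc := ([] : List (List (String × String))))
    (p := fun k => pvHV (PySem.Dict.getD (pvDictOf va) k []) ≠ pvHV (PySem.Dict.getD (pvDictOf vb) k []))
    (f := fun k => pvMkRow k (pvHV (PySem.Dict.getD (pvDictOf va) k [])) (pvHV (PySem.Dict.getD (pvDictOf vb) k [])))
  simpa using this

theorem main_eq (va vb : List (String × String × List (String × String))) (feature : Option String)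
    (hA : (va.map pvKeyOf).Nodup) (hB : (vb.map pvKeyOf).Nodup) :
    find_disagreements va vb feature = find_disagreements_alt va vb feature := by
  set Ka := (va.map pvKeyOf).filter (fun k => pvFeatOk feature k.1) with hKa
  set Kb := (vb.map pvKeyOf).filter (fun k => pvFeatOk feature k.1) with hKb
  set f : (String × String) → List (String × String) :=
    fun k => pvMkRow k (pvHV (PySem.Dict.getD (pvDictOf va) k [])) (pvHV (PySem.Dict.getD (pvDictOf vb) k [])) with hf
  set c : (String × String) → Bool :=
    fun k => decide (pvHV (PySem.Dict.getD (pvDictOf va) k []) ≠ pvHV (PySem.Dict.getD (pvDictOf vb) k [])) with hc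
  have hKand : Ka.Nodup := hA.filter _
  have hKbnd : Kb.Nodup := hB.filter _
  -- B side
  have hpa := pairs_eq feature va hA
  have hpb := pairs_eq feature vb hB
  have hpwA : (pvPairs feature va).Pairwise (fun x y => toLex x.1 < toLex y.1) := by
    rw [hpa]
    exact List.pairwise_map.2 (sorted_pairwise_lt_of_nodup Ka hKand)
  have hpwB : (pvPairs feature vb).Pairwise (fun x y => toLex x.1 < toLex y.1) := by
    rw [hpb]
    exact List.pairwise_map.2 (sorted_pairwise_lt_of_nodup Kb hKbnd)
  have hBside : find_disagreements_alt va vb feature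
      = (PySem.List.sorted Ka (fun k => toLex (k.1, k.2))).flatMap
          (fun k => if decide (k ∈ Kb) && c k then [f k] else []) := by
    unfold find_disagreements_alt
    rw [merge_spec _ _ hpwA hpwB, hpa, hpb, List.flatMap_map]
    apply pvFlatMap_congr
    intro k _
    show (match ((PySem.List.sorted Kb (fun k => toLex (k.1, k.2))).map
          (fun k => (k, PySem.Dict.getD (pvDictOf vb) k []))).find? (fun q => q.1 == k) with
      | none => []
      | some q => if pvHV (PySem.Dict.getD (pvDictOf va) k []) ≠ pvHV q.2 then
          [pvMkRow k (pvHV (PySem.Dict.getD (pvDictOf va) k [])) (pvHV q.2)] else []) = _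
    rw [find?_map_pair]
    have hmem : (k ∈ PySem.List.sorted Kb (fun k => toLex (k.1, k.2))) ↔ k ∈ Kb :=
      PySem.List.mem_sorted Kb (fun k => toLex (k.1, k.2)) false k
    by_cases hk : k ∈ Kb
    · rw [if_pos (hmem.2 hk)]
      by_cases hcv : pvHV (PySem.Dict.getD (pvDictOf va) k []) ≠ pvHV (PySem.Dict.getD (pvDictOf vb) k [])
      · simp [hk, hcv, hc, hf]
      · simp [hk, hcv, hc]
    · rw [if_neg (fun h => hk (hmem.1 h))]
      simp [hk]
  rw [hBside, pvFlatMap_ite, sorted_filter_comm Ka hKand]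
  -- A side
  unfold find_disagreements
  dsimp only
  rw [sorted2_eq_sorted_lex, inter_eq va vb feature hA hB, foldl_A_eq]
  rw [sorted_filter_comm _ (hA.filter _)]
  congr 2
  rw [hKa, List.filter_filter, List.filter_filter]
  apply List.filter_congr
  intro k _
  by_cases hok : pvFeatOk feature k.1 = true
  · by_cases hm : k ∈ vb.map pvKeyOf
    · have hkb : k ∈ Kb := by rw [hKb]; exact List.mem_filter.2 ⟨hm, hok⟩
      simp [hok, hm, hkb, hc, decide_not]
    · have hkb : k ∉ Kb := fun h => hm (List.mem_of_mem_filter h)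
      simp [hok, hm, hkb]
  · have hok' : pvFeatOk feature k.1 = false := by
      cases hpf : pvFeatOk feature k.1
      · rfl
      · exact absurd hpf hok
    simp [hok']

-- ===== VERDICT (by name: the statement is the Claim_ definition above) =====
theorem find_disagreements_spec : Claim_equal_find_disagreements := by
  intro va vb feature _ hpre
  unfold Spec_find_disagreements
  exact main_eq va vb feature hpre.1 hpre.2.1
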